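-- pv_equiv track=rewrite | github.com/ja153903/start-thinking-more | advent_of_code/yr2024/day15/main.py | is_path_clear_for_vertical_move
-- ===== SOURCE A (Python) =====
-- def get_instruction_delta(instruction: str) -> tuple[int, int]:
--     match instruction:
--         case "^":
--             return (-1, 0)
--         case "v":
--             return (1, 0)
--         case "<":
--             return (0, -1)
--         case _:
--             return (0, 1)
--
-- def in_bounds(grid: list[list[str]], row: int, col: int):
--     return 0 <= row <= len(grid) - 1 and 0 <= col <= len(grid[0]) - 1
--
-- def is_path_clear_for_vertical_move(
--     grid: list[list[str]], row: int, col: int, instruction: str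
-- ):
--     dr, dc = get_instruction_delta(instruction)
--     nr, nc = row + dr, col + dc
--
--     if not in_bounds(grid, nr, nc) or grid[nr][nc] == "#":
--         return False
--
--     if grid[nr][nc] == ".":
--         return True
--
--     offset_r, offset_c = [nr, nc - 1] if grid[nr][nc] == "]" else [nr, nc + 1]
--
--     return is_path_clear_for_vertical_move(
--         grid, offset_r, offset_c, instruction
--     ) and is_path_clear_for_vertical_move(grid, nr, nc, instruction)
-- ===== SOURCE B (Python) =====
-- def is_path_clear_for_vertical_move(grid, row, col, instruction):
--     dr, dc = {"^": (-1, 0), "v": (1, 0), "<": (0, -1)}.get(instruction, (0, 1))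
--     reached = {(row, col)}
--     while True:
--         new = set()
--         for (r, c) in reached:
--             nr, nc = r + dr, c + dc
--             if 0 <= nr < len(grid) and 0 <= nc < len(grid[0]):
--                 cell = grid[nr][nc]
--                 if cell != "." and cell != "#":
--                     new.add((nr, nc))
--                     new.add((nr, nc - 1) if cell == "]" else (nr, nc + 1))
--         if new <= reached:
--             break
--         reached |= new
--     return all(
--         0 <= r + dr < len(grid)
--         and 0 <= c + dc < len(grid[0])
--         and grid[r + dr][c + dc] != "#"
--         for (r, c) in reached
--     )
-- ===== Notes on version B (the rewrite author's own statement) =====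
-- stated objective: alternative
-- what changed: Replaces A's two-branch recursion with a round-based fixpoint: grow the set of affected cells until it is closed under the push relation, then check all of them in one pass, so each cell is examined a bounded number of times instead of exponentially often.
-- outside the precondition, e.g. on is_path_clear_for_vertical_move([['.', '.'], ['x']], 1, 0, '^'): A returns True, B returns True; on is_path_clear_for_vertical_move([['x', '#', ']', ']']], 0, 4, '<'): A returns False, B returns False
import Mathlib
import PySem

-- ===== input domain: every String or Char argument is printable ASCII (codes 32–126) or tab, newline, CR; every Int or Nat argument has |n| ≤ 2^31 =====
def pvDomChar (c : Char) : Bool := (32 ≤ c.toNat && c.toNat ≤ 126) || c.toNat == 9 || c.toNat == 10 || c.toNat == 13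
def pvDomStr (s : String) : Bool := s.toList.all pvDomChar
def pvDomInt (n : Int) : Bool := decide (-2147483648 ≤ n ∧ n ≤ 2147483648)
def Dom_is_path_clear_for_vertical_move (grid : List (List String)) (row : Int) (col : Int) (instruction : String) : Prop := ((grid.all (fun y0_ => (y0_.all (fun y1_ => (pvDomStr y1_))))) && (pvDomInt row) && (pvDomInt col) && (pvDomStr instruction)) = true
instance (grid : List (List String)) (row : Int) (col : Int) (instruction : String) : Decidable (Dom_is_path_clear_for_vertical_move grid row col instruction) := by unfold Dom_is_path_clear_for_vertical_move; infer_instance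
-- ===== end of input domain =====

-- B replaces A's two-branch recursion by a round-based fixpoint: it grows the SET of affected
-- cells until it is closed, then checks every cell of the set in one pass ('alternative').
-- Equality of the RETURN value is proved on Pre_.

-- ===== PORT A =====
-- match instruction: ^ / v / < / default
def pvDeltaA (instruction : String) : Int × Int :=
  if instruction = "^" then (-1, 0)
  else if instruction = "v" then (1, 0)
  else if instruction = "<" then (0, -1)
  else (0, 1)

-- 0 <= row <= len(grid)-1 and 0 <= col <= len(grid[0])-1   (short-circuit: grid[0] only read when grid ≠ [])
def pvInBoundsA (grid : List (List String)) (row col : Int) : Bool :=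
  decide (0 ≤ row) && decide (row ≤ (grid.length : Int) - 1) &&
  (decide (0 ≤ col) && decide (col ≤ ((grid.headD []).length : Int) - 1))

-- grid[r][c]; exact whenever the indices are in range (Pre_ guarantees every performed access is)
def pvCellA (grid : List (List String)) (r c : Int) : String :=
  PySem.List.pyGetD (PySem.List.pyGetD grid r []) c ""

-- the recursion of A, step for step; the fuel is only a totality guard (Pre_ proves it sufficient,
-- see pvGoA_up_total … pvGoA_right_total below); `none` = fuel exhausted, never reached inside Pre_
def pvGoA (grid : List (List String)) (dr dc : Int) : Nat → Int → Int → Option Bool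
  | 0, _, _ => none
  | Nat.succ n, row, col =>
    let nr := row + dr
    let nc := col + dc
    if !pvInBoundsA grid nr nc || pvCellA grid nr nc == "#" then some false
    else if pvCellA grid nr nc == "." then some true
    else
      let off : Int × Int := if pvCellA grid nr nc == "]" then (nr, nc - 1) else (nr, nc + 1)
      -- "return f(offset) and f(nr, nc)": left first, short-circuit on False
      match pvGoA grid dr dc n off.1 off.2 with
      | none => none
      | some false => some false
      | some true => pvGoA grid dr dc n nr nc

def is_path_clear_for_vertical_move (grid : List (List String)) (row : Int) (col : Int) (instruction : String) : Bool :=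
  let d := pvDeltaA instruction
  (pvGoA grid d.1 d.2 (grid.length + (grid.headD []).length + row.natAbs + col.natAbs + 3) row col).getD false

-- ===== PORT B =====
-- {"^": (-1, 0), "v": (1, 0), "<": (0, -1)}.get(instruction, (0, 1))
def pvDeltaB (instruction : String) : Int × Int :=
  PySem.Dict.getD
    (PySem.Dict.ofList [("^", ((-1 : Int), (0 : Int))), ("v", (1, 0)), ("<", (0, -1))])
    instruction (0, 1)

-- the body of Source B's 'for (r, c) in reached' loop: conditionally add the two pushed cells to 'new'
def pvStepB (grid : List (List String)) (dr dc : Int)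
    (nw : PySem.Set (Int × Int)) (p : Int × Int) : PySem.Set (Int × Int) :=
  if decide (0 ≤ p.1 + dr ∧ p.1 + dr < (grid.length : Int) ∧
             0 ≤ p.2 + dc ∧ p.2 + dc < ((grid.headD []).length : Int)) then
    (if PySem.List.pyGetD (PySem.List.pyGetD grid (p.1 + dr) []) (p.2 + dc) "" ≠ "." ∧
        PySem.List.pyGetD (PySem.List.pyGetD grid (p.1 + dr) []) (p.2 + dc) "" ≠ "#" then
      PySem.Set.add (PySem.Set.add nw (p.1 + dr, p.2 + dc))
        (if PySem.List.pyGetD (PySem.List.pyGetD grid (p.1 + dr) []) (p.2 + dc) "" = "]"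
         then (p.1 + dr, p.2 + dc - 1) else (p.1 + dr, p.2 + dc + 1))
     else nw)
  else nw

-- one round: new = set(); for (r, c) in reached: …  (set-valued, so order of iteration is immaterial)
def pvExpandB (grid : List (List String)) (dr dc : Int)
    (reached : PySem.Set (Int × Int)) : PySem.Set (Int × Int) :=
  reached.foldl (pvStepB grid dr dc) PySem.Set.empty

-- the 'while True' fixpoint loop: stop when new <= reached, else reached |= new;
-- the fuel is only a totality guard (pvCloseB_spec below proves it sufficient for every input)
def pvCloseB (grid : List (List String)) (dr dc : Int) :
    Nat → PySem.Set (Int × Int) → PySem.Set (Int × Int)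
  | 0, reached => reached
  | Nat.succ n, reached =>
    let nw := pvExpandB grid dr dc reached
    if PySem.Set.issubset nw reached then reached
    else pvCloseB grid dr dc n (PySem.Set.update reached nw)

def is_path_clear_for_vertical_move_alt (grid : List (List String)) (row : Int) (col : Int) (instruction : String) : Bool :=
  let d := pvDeltaB instruction
  let reached := pvCloseB grid d.1 d.2 (grid.length * ((grid.headD []).length + 2) + 2)
    (PySem.Set.ofList [(row, col)])
  reached.all fun p =>
    decide (0 ≤ p.1 + d.1 ∧ p.1 + d.1 < (grid.length : Int) ∧
            0 ≤ p.2 + d.2 ∧ p.2 + d.2 < ((grid.headD []).length : Int)) &&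
    (PySem.List.pyGetD (PySem.List.pyGetD grid (p.1 + d.1) []) (p.2 + d.2) "" != "#")

-- ===== PRECONDITION & SPEC =====
-- Pre_ excludes the inputs where A raises — IndexError on a grid with a row shorter than row 0 that the
-- walk can touch, RecursionError when a horizontal push runs into a mismatched box bracket — plus,
-- conservatively, a few inputs of the same two shapes on which A still returns False only because a
-- short-circuited `and` stops just before the raising branch; A and B agree on those (see the cites).
def Pre_is_path_clear_for_vertical_move (grid : List (List String)) (row : Int) (col : Int) (instruction : String) : Prop :=
  let d : Int × Int :=
    if instruction = "^" then (-1, 0)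
    else if instruction = "v" then (1, 0)
    else if instruction = "<" then (0, -1)
    else (0, 1)
  ¬ (0 ≤ row + d.1 ∧ row + d.1 < (grid.length : Int) ∧
     0 ≤ col + d.2 ∧ col + d.2 < ((grid.headD []).length : Int)) ∨
  ((∀ r ∈ grid, (grid.headD []).length ≤ r.length) ∧
   (instruction = "^" ∨ instruction = "v" ∨
    (instruction = "<" ∧
      ∀ s ∈ (grid.getD row.toNat []).take col.toNat, s = "#" ∨ s = "." ∨ s = "]") ∨
    (instruction ≠ "^" ∧ instruction ≠ "v" ∧ instruction ≠ "<" ∧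
      ∀ s ∈ (grid.getD row.toNat []).drop (col + 1).toNat, s ≠ "]")))
instance (grid : List (List String)) (row : Int) (col : Int) (instruction : String) : Decidable (Pre_is_path_clear_for_vertical_move grid row col instruction) := by unfold Pre_is_path_clear_for_vertical_move; infer_instance

def pvWitness_is_path_clear_for_vertical_move : List (List String) × Int × Int × String :=
  ([["@", "."], ["]", "#"]], 1, 0, "^")

def Spec_is_path_clear_for_vertical_move (grid : List (List String)) (row : Int) (col : Int) (instruction : String) (out : Bool) : Prop := out = is_path_clear_for_vertical_move_alt grid row col instruction
instance (grid : List (List String)) (row : Int) (col : Int) (instruction : String) (out : Bool) : Decidable (Spec_is_path_clear_for_vertical_move grid row col instruction out) := by unfold Spec_is_path_clear_for_vertical_move; infer_instance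

-- ===== CLAIM (what is proved, stated in full; the proofs are below) =====
def Claim_equal_is_path_clear_for_vertical_move : Prop := ∀ (grid : List (List String)) (row : Int) (col : Int) (instruction : String), Dom_is_path_clear_for_vertical_move grid row col instruction → Pre_is_path_clear_for_vertical_move grid row col instruction → Spec_is_path_clear_for_vertical_move grid row col instruction (is_path_clear_for_vertical_move grid row col instruction)

-- ===== LEMMAS AND PROOFS =====

-- one step of either program, abstracted: the examined cell is (p.1+dr, p.2+dc)
def pvNxt (dr dc : Int) (p : Int × Int) : Int × Int := (p.1 + dr, p.2 + dc)
def pvBad (g : List (List String)) (dr dc : Int) (p : Int × Int) : Bool :=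
  !pvInBoundsA g (p.1 + dr) (p.2 + dc) || pvCellA g (p.1 + dr) (p.2 + dc) == "#"
def pvDone (g : List (List String)) (dr dc : Int) (p : Int × Int) : Bool :=
  pvCellA g (p.1 + dr) (p.2 + dc) == "."
def pvOff (g : List (List String)) (dr dc : Int) (p : Int × Int) : Int × Int :=
  if pvCellA g (p.1 + dr) (p.2 + dc) == "]" then (p.1 + dr, p.2 + dc - 1) else (p.1 + dr, p.2 + dc + 1)

-- cells the recursion of A (and the closure of B) can reach from a start cell
inductive PvReach (g : List (List String)) (dr dc : Int) (p : Int × Int) : Int × Int → Prop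
  | refl : PvReach g dr dc p p
  | step (q r : Int × Int) : PvReach g dr dc p q → pvBad g dr dc q = false →
      pvDone g dr dc q = false → (r = pvOff g dr dc q ∨ r = pvNxt dr dc q) → PvReach g dr dc p r

lemma pvGoA_succ (g : List (List String)) (dr dc : Int) (n : Nat) (r c : Int) :
    pvGoA g dr dc (n + 1) r c =
      if pvBad g dr dc (r, c) then some false
      else if pvDone g dr dc (r, c) then some true
      else match pvGoA g dr dc n (pvOff g dr dc (r, c)).1 (pvOff g dr dc (r, c)).2 with
        | none => none
        | some false => some false
        | some true => pvGoA g dr dc n (r + dr) (c + dc) := by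
  simp only [pvGoA, pvBad, pvDone, pvOff]

lemma pvReach_trans (g : List (List String)) (dr dc : Int) (p q r : Int × Int)
    (h1 : PvReach g dr dc p q) (h2 : PvReach g dr dc q r) : PvReach g dr dc p r := by
  induction h2 with
  | refl => exact h1
  | step a b hab hbad hdone hc ih => exact PvReach.step _ _ ih hbad hdone hc

lemma pvGoA_true_bad (g : List (List String)) (dr dc : Int) (n : Nat) (r c : Int)
    (h : pvGoA g dr dc n r c = some true) : pvBad g dr dc (r, c) = false := by
  cases n with
  | zero => simp [pvGoA] at h
  | succ n =>
    rw [pvGoA_succ] at h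
    by_cases hb : pvBad g dr dc (r, c) = true
    · simp [hb] at h
    · exact Bool.not_eq_true _ |>.mp hb

lemma pvGoA_true_step (g : List (List String)) (dr dc : Int) (n : Nat) (r c : Int)
    (h : pvGoA g dr dc (n + 1) r c = some true)
    (hb : pvBad g dr dc (r, c) = false) (hd : pvDone g dr dc (r, c) = false) :
    pvGoA g dr dc n (pvOff g dr dc (r, c)).1 (pvOff g dr dc (r, c)).2 = some true ∧
    pvGoA g dr dc n (r + dr) (c + dc) = some true := by
  rw [pvGoA_succ] at h
  simp only [hb, hd, Bool.false_eq_true, if_false] at h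
  rcases hoff : pvGoA g dr dc n (pvOff g dr dc (r, c)).1 (pvOff g dr dc (r, c)).2 with _ | bo
  · rw [hoff] at h; simp at h
  · rw [hoff] at h
    cases bo with
    | false => simp at h
    | true => exact ⟨rfl, h⟩

lemma pvGoA_true_reach (g : List (List String)) (dr dc : Int) :
    ∀ (n : Nat) (r c : Int), pvGoA g dr dc n r c = some true →
      ∀ q, PvReach g dr dc (r, c) q → pvBad g dr dc q = false := by
  intro n r c h q hr
  have key : ∀ q, PvReach g dr dc (r, c) q → ∃ m, pvGoA g dr dc m q.1 q.2 = some true := by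
    intro q hq
    induction hq with
    | refl => exact ⟨n, h⟩
    | step a b ha hbad hdone hchild ih =>
      obtain ⟨m, hm⟩ := ih
      obtain ⟨m', rfl⟩ : ∃ m', m = m' + 1 := by
        cases m with
        | zero => simp [pvGoA] at hm
        | succ k => exact ⟨k, rfl⟩
      have both := pvGoA_true_step g dr dc m' a.1 a.2 hm hbad hdone
      rcases hchild with h1 | h1
      · exact ⟨m', by rw [h1]; exact both.1⟩
      · exact ⟨m', by rw [h1]; exact both.2⟩
  obtain ⟨m, hm⟩ := key q hr
  exact pvGoA_true_bad g dr dc m q.1 q.2 hm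

lemma pvGoA_complete (g : List (List String)) (dr dc : Int) :
    ∀ (n : Nat) (r c : Int), pvGoA g dr dc n r c ≠ none →
      (∀ q, PvReach g dr dc (r, c) q → pvBad g dr dc q = false) →
      pvGoA g dr dc n r c = some true := by
  intro n
  induction n with
  | zero => intro r c hne _; simp [pvGoA] at hne
  | succ n ih =>
    intro r c hne hsafe
    have hb : pvBad g dr dc (r, c) = false := hsafe (r, c) PvReach.refl
    rw [pvGoA_succ] at hne ⊢
    by_cases hd : pvDone g dr dc (r, c) = true
    · simp [hb, hd]
    · rw [Bool.not_eq_true] at hd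
      simp only [hb, hd, Bool.false_eq_true, if_false] at hne ⊢
      have hroff : PvReach g dr dc (r, c) (pvOff g dr dc (r, c)) :=
        PvReach.step _ _ PvReach.refl hb hd (Or.inl rfl)
      have hsafeoff : ∀ q, PvReach g dr dc ((pvOff g dr dc (r, c)).1, (pvOff g dr dc (r, c)).2) q →
          pvBad g dr dc q = false := by
        intro q hq
        exact hsafe q (pvReach_trans g dr dc _ _ _ hroff hq)
      rcases hoff : pvGoA g dr dc n (pvOff g dr dc (r, c)).1 (pvOff g dr dc (r, c)).2 with _ | bo
      · rw [hoff] at hne; simp at hne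
      · have htr := ih (pvOff g dr dc (r, c)).1 (pvOff g dr dc (r, c)).2 (by rw [hoff]; simp) hsafeoff
        rw [hoff] at htr
        cases bo with
        | false => simp at htr
        | true =>
          have hrnxt : PvReach g dr dc (r, c) (pvNxt dr dc (r, c)) :=
            PvReach.step _ _ PvReach.refl hb hd (Or.inr rfl)
          have hnne : pvGoA g dr dc n (r + dr) (c + dc) ≠ none := by
            rw [hoff] at hne; exact hne
          have := ih (r + dr) (c + dc) hnne
            (fun q hq => hsafe q (pvReach_trans g dr dc _ _ _ hrnxt hq))
          simpa using this

-- ===== termination of A inside Pre_ =====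

lemma pvGoA_bad_eval (g : List (List String)) (dr dc : Int) (n : Nat) (r c : Int)
    (h : pvBad g dr dc (r, c) = true) (hn : 0 < n) : pvGoA g dr dc n r c = some false := by
  obtain ⟨m, rfl⟩ : ∃ m, n = m + 1 := ⟨n - 1, by omega⟩
  rw [pvGoA_succ, h]; simp

lemma pvBad_false_bounds (g : List (List String)) (dr dc : Int) (p : Int × Int)
    (h : pvBad g dr dc p = false) :
    0 ≤ p.1 + dr ∧ p.1 + dr ≤ (g.length : Int) - 1 ∧
    0 ≤ p.2 + dc ∧ p.2 + dc ≤ ((g.headD []).length : Int) - 1 := by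
  simp only [pvBad, pvInBoundsA, Bool.or_eq_false_iff, Bool.not_eq_false',
    Bool.and_eq_true, decide_eq_true_eq] at h
  exact ⟨h.1.1.1, h.1.1.2, h.1.2.1, h.1.2.2⟩

lemma pvOff_fst (g : List (List String)) (dr dc : Int) (p : Int × Int) :
    (pvOff g dr dc p).1 = p.1 + dr := by
  unfold pvOff; split <;> rfl

lemma pvOff_snd (g : List (List String)) (dr dc : Int) (p : Int × Int) :
    (pvOff g dr dc p).2 = p.2 + dc - 1 ∨ (pvOff g dr dc p).2 = p.2 + dc + 1 := by
  unfold pvOff; split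
  · exact Or.inl rfl
  · exact Or.inr rfl

lemma pvGoA_up_total (g : List (List String)) :
    ∀ (n : Nat) (r c : Int), (r + 2).toNat < n → pvGoA g (-1) 0 n r c ≠ none := by
  intro n
  induction n with
  | zero => intro r c hlt; omega
  | succ n ih =>
    intro r c hlt
    rw [pvGoA_succ]
    by_cases hb : pvBad g (-1) 0 (r, c) = true
    · simp [hb]
    · rw [Bool.not_eq_true] at hb
      by_cases hd : pvDone g (-1) 0 (r, c) = true
      · simp [hb, hd]
      · rw [Bool.not_eq_true] at hd
        simp only [hb, hd, Bool.false_eq_true, if_false]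
        obtain ⟨hr0, -, -, -⟩ := pvBad_false_bounds g (-1) 0 (r, c) hb
        have hoffr : (pvOff g (-1) 0 (r, c)).1 = r + -1 := pvOff_fst g (-1) 0 (r, c)
        have hoffne := ih (pvOff g (-1) 0 (r, c)).1 (pvOff g (-1) 0 (r, c)).2
          (by rw [hoffr]; omega)
        rcases hv : pvGoA g (-1) 0 n (pvOff g (-1) 0 (r, c)).1 (pvOff g (-1) 0 (r, c)).2 with _ | bo
        · exact absurd hv hoffne
        · cases bo with
          | false => simp
          | true => simpa using ih (r + -1) (c + 0) (by omega)

lemma pvGoA_down_total (g : List (List String)) :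
    ∀ (n : Nat) (r c : Int), ((g.length : Int) - r + 1).toNat < n → pvGoA g 1 0 n r c ≠ none := by
  intro n
  induction n with
  | zero => intro r c hlt; omega
  | succ n ih =>
    intro r c hlt
    rw [pvGoA_succ]
    by_cases hb : pvBad g 1 0 (r, c) = true
    · simp [hb]
    · rw [Bool.not_eq_true] at hb
      by_cases hd : pvDone g 1 0 (r, c) = true
      · simp [hb, hd]
      · rw [Bool.not_eq_true] at hd
        simp only [hb, hd, Bool.false_eq_true, if_false]
        obtain ⟨-, hr1, -, -⟩ := pvBad_false_bounds g 1 0 (r, c) hb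
        have hoffr : (pvOff g 1 0 (r, c)).1 = r + 1 := pvOff_fst g 1 0 (r, c)
        have hoffne := ih (pvOff g 1 0 (r, c)).1 (pvOff g 1 0 (r, c)).2
          (by rw [hoffr]; omega)
        rcases hv : pvGoA g 1 0 n (pvOff g 1 0 (r, c)).1 (pvOff g 1 0 (r, c)).2 with _ | bo
        · exact absurd hv hoffne
        · cases bo with
          | false => simp
          | true => simpa using ih (r + 1) (c + 0) (by omega)

lemma pvBad_false_cell (g : List (List String)) (dr dc : Int) (p : Int × Int)
    (h : pvBad g dr dc p = false) : pvCellA g (p.1 + dr) (p.2 + dc) ≠ "#" := by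
  simp only [pvBad, Bool.or_eq_false_iff, beq_eq_false_iff_ne, ne_eq] at h
  exact h.2

lemma pvDone_false_cell (g : List (List String)) (dr dc : Int) (p : Int × Int)
    (h : pvDone g dr dc p = false) : pvCellA g (p.1 + dr) (p.2 + dc) ≠ "." := by
  simp only [pvDone, beq_eq_false_iff_ne, ne_eq] at h
  exact h

lemma pvRowLen (g : List (List String)) (r : Int)
    (hshape : ∀ z ∈ g, (g.headD []).length ≤ z.length)
    (h0 : 0 ≤ r) (h1 : r ≤ (g.length : Int) - 1) :
    (g.headD []).length ≤ (g.getD r.toNat []).length := by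
  have hlt : r.toNat < g.length := by omega
  rw [List.getD_eq_getElem g [] hlt]
  exact hshape _ (List.getElem_mem hlt)

lemma pvCellA_getElem (g : List (List String)) (r c : Int)
    (h0r : 0 ≤ r) (h1r : r ≤ (g.length : Int) - 1) (h0c : 0 ≤ c)
    (hlen : c < ((g.getD r.toNat []).length : Int)) :
    pvCellA g r c = (g.getD r.toNat []).getD c.toNat "" := by
  unfold pvCellA
  rw [PySem.List.pyGetD_of_nonneg g [] h0r, PySem.List.pyGetD_of_nonneg _ "" h0c]

lemma pvTakeMono {α : Type} (l : List α) {m n : Nat} (h : m ≤ n) : l.take m ⊆ l.take n := by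
  have : l.take m = (l.take n).take m := by rw [List.take_take, Nat.min_eq_left h]
  rw [this]
  exact List.take_subset _ _

lemma pvDropMono {α : Type} (l : List α) {m n : Nat} (h : m ≤ n) : l.drop n ⊆ l.drop m := by
  have : l.drop n = (l.drop m).drop (n - m) := by rw [List.drop_drop]; congr 1; omega
  rw [this]
  exact List.drop_subset _ _

lemma pvGoA_left_total (g : List (List String))
    (hshape : ∀ r ∈ g, (g.headD []).length ≤ r.length) (r : Int) :
    ∀ (n : Nat) (c : Int),
      (∀ s ∈ (g.getD r.toNat []).take c.toNat, s = "#" ∨ s = "." ∨ s = "]") →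
      (c + 2).toNat < n → pvGoA g 0 (-1) n r c ≠ none := by
  intro n
  induction n with
  | zero => intro c _ hlt; omega
  | succ n ih =>
    intro c hcond hlt
    rw [pvGoA_succ]
    by_cases hb : pvBad g 0 (-1) (r, c) = true
    · simp [hb]
    · rw [Bool.not_eq_true] at hb
      by_cases hd : pvDone g 0 (-1) (r, c) = true
      · simp [hb, hd]
      · rw [Bool.not_eq_true] at hd
        simp only [hb, hd, Bool.false_eq_true, if_false]
        obtain ⟨h0r, h1r, h0c, h1c⟩ := pvBad_false_bounds g 0 (-1) (r, c) hb
        simp only [add_zero] at h0r h1r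
        have hrow := pvRowLen g r hshape h0r h1r
        have hcell : pvCellA g (r + 0) (c + -1) = (g.getD r.toNat []).getD (c + -1).toNat "" := by
          rw [show r + 0 = r from by ring]
          exact pvCellA_getElem g r (c + -1) h0r h1r h0c (by omega)
        have hmem : (g.getD r.toNat []).getD (c + -1).toNat "" ∈ (g.getD r.toNat []).take c.toNat := by
          have hidx : (c + -1).toNat < (g.getD r.toNat []).length := by omega
          rw [List.getD_eq_getElem _ "" hidx]
          have hidx2 : (c + -1).toNat < ((g.getD r.toNat []).take c.toNat).length := by
            simp only [List.length_take]; omega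
          have := List.getElem_take (xs := g.getD r.toNat []) (h := hidx2)
          rw [← this]
          exact List.getElem_mem hidx2
        have hc3 := hcond _ hmem
        have hne1 := pvBad_false_cell g 0 (-1) (r, c) hb
        have hne2 := pvDone_false_cell g 0 (-1) (r, c) hd
        rw [hcell] at hne1 hne2
        have hcellv : pvCellA g (r + 0) (c + -1) = "]" := by
          rw [hcell]
          rcases hc3 with h | h | h
          · exact absurd h hne1
          · exact absurd h hne2
          · exact h
        have hoffv : pvOff g 0 (-1) (r, c) = (r + 0, c + -1 - 1) := by
          unfold pvOff
          rw [show pvCellA g ((r, c).1 + 0) ((r, c).2 + -1) = "]" from hcellv]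
          simp
        have hcondsub : ∀ (m : Nat), m ≤ c.toNat →
            ∀ s ∈ (g.getD r.toNat []).take m, s = "#" ∨ s = "." ∨ s = "]" := by
          intro m hm s hs
          exact hcond s (pvTakeMono _ hm hs)
        have hoffne := ih (c + -1 - 1)
          (hcondsub (c + -1 - 1).toNat (by omega)) (by omega)
        rw [hoffv]
        simp only [add_zero]
        rcases hv : pvGoA g 0 (-1) n r (c + -1 - 1) with _ | bo
        · exact absurd hv hoffne
        · cases bo with
          | false => simp
          | true =>
            have := ih (c + -1) (hcondsub (c + -1).toNat (by omega)) (by omega)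
            simpa using this

lemma pvGoA_right_total (g : List (List String))
    (hshape : ∀ r ∈ g, (g.headD []).length ≤ r.length) (r : Int) :
    ∀ (n : Nat) (c : Int),
      (∀ s ∈ (g.getD r.toNat []).drop (c + 1).toNat, s ≠ "]") →
      (((g.headD []).length : Int) - c + 1).toNat < n → pvGoA g 0 1 n r c ≠ none := by
  intro n
  induction n with
  | zero => intro c _ hlt; omega
  | succ n ih =>
    intro c hcond hlt
    rw [pvGoA_succ]
    by_cases hb : pvBad g 0 1 (r, c) = true
    · simp [hb]
    · rw [Bool.not_eq_true] at hb
      by_cases hd : pvDone g 0 1 (r, c) = true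
      · simp [hb, hd]
      · rw [Bool.not_eq_true] at hd
        simp only [hb, hd, Bool.false_eq_true, if_false]
        obtain ⟨h0r, h1r, h0c, h1c⟩ := pvBad_false_bounds g 0 1 (r, c) hb
        simp only [add_zero] at h0r h1r
        have hrow := pvRowLen g r hshape h0r h1r
        have hcell : pvCellA g (r + 0) (c + 1) = (g.getD r.toNat []).getD (c + 1).toNat "" := by
          rw [show r + 0 = r from by ring]
          exact pvCellA_getElem g r (c + 1) h0r h1r h0c (by omega)
        have hmem : (g.getD r.toNat []).getD (c + 1).toNat "" ∈ (g.getD r.toNat []).drop (c + 1).toNat := by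
          have hidx : (c + 1).toNat < (g.getD r.toNat []).length := by omega
          rw [List.getD_eq_getElem _ "" hidx]
          have hidx2 : 0 < ((g.getD r.toNat []).drop (c + 1).toNat).length := by
            simp only [List.length_drop]; omega
          have heq := List.getElem_drop (xs := g.getD r.toNat []) (i := (c + 1).toNat) (j := 0)
            (h := by simpa using hidx2)
          simp only [Nat.add_zero] at heq
          rw [← heq]
          exact List.getElem_mem hidx2
        have hc3 := hcond _ hmem
        have hcellv : pvCellA g ((r, c).1 + 0) ((r, c).2 + 1) ≠ "]" := by
          intro hx
          exact hc3 (by rw [← hcell]; exact hx)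
        have hoffv : pvOff g 0 1 (r, c) = (r + 0, c + 1 + 1) := by
          unfold pvOff
          rw [if_neg (by simpa using hcellv)]
        have hcondsub : ∀ (m : Nat), (c + 1).toNat ≤ m →
            ∀ s ∈ (g.getD r.toNat []).drop m, s ≠ "]" := by
          intro m hm s hs
          exact hcond s (pvDropMono _ hm hs)
        have hoffne := ih (c + 1 + 1)
          (hcondsub (c + 1 + 1 + 1).toNat (by omega)) (by omega)
        rw [hoffv]
        simp only [add_zero]
        rcases hv : pvGoA g 0 1 n r (c + 1 + 1) with _ | bo
        · exact absurd hv hoffne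
        · cases bo with
          | false => simp
          | true =>
            have := ih (c + 1) (hcondsub (c + 1 + 1).toNat (by omega)) (by omega)
            simpa using this

-- ===== B: the closure loop =====

def pvUniv (g : List (List String)) (p0 : Int × Int) : List (Int × Int) :=
  p0 :: (List.range g.length).flatMap
    (fun r => (List.range ((g.headD []).length + 2)).map (fun c => (Int.ofNat r, Int.ofNat c - 1)))

lemma pvUniv_mem (g : List (List String)) (p0 : Int × Int) (q : Int × Int) :
    q ∈ pvUniv g p0 ↔ q = p0 ∨ (0 ≤ q.1 ∧ q.1 < (g.length : Int) ∧
      -1 ≤ q.2 ∧ q.2 ≤ ((g.headD []).length : Int)) := by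
  constructor
  · intro hq
    rcases List.mem_cons.mp hq with rfl | hq
    · exact Or.inl rfl
    · obtain ⟨a, ha, hq2⟩ := List.mem_flatMap.mp hq
      obtain ⟨b, hb, heq⟩ := List.mem_map.mp hq2
      rw [List.mem_range] at ha hb
      right
      rw [← heq]
      refine ⟨?_, ?_, ?_, ?_⟩ <;> simp only [Int.ofNat_eq_coe] <;> omega
  · intro h
    rcases h with rfl | ⟨h1, h2, h3, h4⟩
    · exact List.mem_cons_self
    · refine List.mem_cons.mpr (Or.inr (List.mem_flatMap.mpr
        ⟨q.1.toNat, List.mem_range.mpr (by omega), List.mem_map.mpr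
          ⟨(q.2 + 1).toNat, List.mem_range.mpr (by omega), ?_⟩⟩))
      have e1 : ((q.1.toNat : Nat) : Int) = q.1 := by omega
      have e2 : (((q.2 + 1).toNat : Nat) : Int) - 1 = q.2 := by omega
      calc (Int.ofNat q.1.toNat, Int.ofNat (q.2 + 1).toNat - 1) = (q.1, q.2) := by
            rw [show Int.ofNat q.1.toNat = ((q.1.toNat : Nat) : Int) from rfl,
                show Int.ofNat (q.2 + 1).toNat = (((q.2 + 1).toNat : Nat) : Int) from rfl, e1, e2]
        _ = q := rfl

lemma pvUniv_length (g : List (List String)) (p0 : Int × Int) :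
    (pvUniv g p0).length = 1 + g.length * ((g.headD []).length + 2) := by
  simp only [pvUniv, List.length_cons, List.length_flatMap, List.length_map,
    List.length_range, List.map_const', List.sum_replicate, smul_eq_mul]
  omega

lemma pvSeenLen (U seen : List (Int × Int)) (hnd : seen.Nodup) (hsub : ∀ p ∈ seen, p ∈ U) :
    seen.length ≤ U.length :=
  (hnd.subperm (fun _ h => hsub _ h)).length_le

-- what one loop-body step adds: exactly the (safe, unfinished) children of p
def pvChild (g : List (List String)) (dr dc : Int) (p z : Int × Int) : Prop :=
  pvBad g dr dc p = false ∧ pvDone g dr dc p = false ∧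
  (z = pvNxt dr dc p ∨ z = pvOff g dr dc p)

lemma pvBad_false_iff (g : List (List String)) (dr dc : Int) (p : Int × Int) :
    pvBad g dr dc p = false ↔
      ((0 ≤ p.1 + dr ∧ p.1 + dr < (g.length : Int) ∧
        0 ≤ p.2 + dc ∧ p.2 + dc < ((g.headD []).length : Int)) ∧
       pvCellA g (p.1 + dr) (p.2 + dc) ≠ "#") := by
  simp only [pvBad, pvInBoundsA, Bool.or_eq_false_iff, Bool.not_eq_false',
    Bool.and_eq_true, decide_eq_true_eq, beq_eq_false_iff_ne, ne_eq]
  constructor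
  · rintro ⟨⟨⟨a, b⟩, c, d⟩, e⟩
    exact ⟨⟨a, by omega, c, by omega⟩, e⟩
  · rintro ⟨⟨a, b, c, d⟩, e⟩
    exact ⟨⟨⟨a, by omega⟩, c, by omega⟩, e⟩

lemma mem_pvStepB (g : List (List String)) (dr dc : Int)
    (nw : PySem.Set (Int × Int)) (p z : Int × Int) :
    z ∈ pvStepB g dr dc nw p ↔ z ∈ nw ∨ pvChild g dr dc p z := by
  unfold pvStepB pvChild
  by_cases hg : (0 ≤ p.1 + dr ∧ p.1 + dr < (g.length : Int) ∧
      0 ≤ p.2 + dc ∧ p.2 + dc < ((g.headD []).length : Int))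
  · rw [if_pos (by exact_mod_cast decide_eq_true hg)]
    by_cases hcell : PySem.List.pyGetD (PySem.List.pyGetD g (p.1 + dr) []) (p.2 + dc) "" ≠ "." ∧
        PySem.List.pyGetD (PySem.List.pyGetD g (p.1 + dr) []) (p.2 + dc) "" ≠ "#"
    · rw [if_pos hcell]
      have hb : pvBad g dr dc p = false :=
        (pvBad_false_iff g dr dc p).mpr ⟨hg, hcell.2⟩
      have hd : pvDone g dr dc p = false := by
        simp only [pvDone, beq_eq_false_iff_ne, ne_eq]
        exact hcell.1
      have hoff : (if PySem.List.pyGetD (PySem.List.pyGetD g (p.1 + dr) []) (p.2 + dc) "" = "]"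
          then ((p.1 + dr, p.2 + dc - 1) : Int × Int) else (p.1 + dr, p.2 + dc + 1)) =
          pvOff g dr dc p := by
        unfold pvOff pvCellA
        simp only [beq_iff_eq]
      rw [PySem.Set.mem_add, PySem.Set.mem_add, hoff]
      constructor
      · rintro ((h | h) | h)
        · exact Or.inl h
        · exact Or.inr ⟨hb, hd, Or.inl h⟩
        · exact Or.inr ⟨hb, hd, Or.inr h⟩
      · rintro (h | ⟨-, -, (h | h)⟩)
        · exact Or.inl (Or.inl h)
        · exact Or.inl (Or.inr h)
        · exact Or.inr h
    · rw [if_neg hcell]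
      constructor
      · exact Or.inl
      · rintro (h | ⟨hb, hd, -⟩)
        · exact h
        · exfalso
          apply hcell
          have hd' : PySem.List.pyGetD (PySem.List.pyGetD g (p.1 + dr) []) (p.2 + dc) "" ≠ "." := by
            simpa only [pvDone, pvCellA, beq_eq_false_iff_ne, ne_eq] using hd
          have hb' := ((pvBad_false_iff g dr dc p).mp hb).2
          simp only [pvCellA] at hb'
          exact ⟨hd', hb'⟩
  · rw [if_neg (by simpa using hg)]
    constructor
    · exact Or.inl
    · rintro (h | ⟨hb, -, -⟩)
      · exact h
      · exact absurd ((pvBad_false_iff g dr dc p).mp hb).1 hg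

lemma mem_foldl_pvStepB (g : List (List String)) (dr dc : Int) :
    ∀ (l : List (Int × Int)) (acc : PySem.Set (Int × Int)) (z : Int × Int),
      z ∈ l.foldl (pvStepB g dr dc) acc ↔ z ∈ acc ∨ ∃ p ∈ l, pvChild g dr dc p z := by
  intro l
  induction l with
  | nil => intro acc z; simp
  | cons p rest ih =>
    intro acc z
    simp only [List.foldl_cons, ih, mem_pvStepB, List.mem_cons]
    constructor
    · rintro ((h | h) | ⟨q, hq, hc⟩)
      · exact Or.inl h
      · exact Or.inr ⟨p, Or.inl rfl, h⟩
      · exact Or.inr ⟨q, Or.inr hq, hc⟩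
    · rintro (h | ⟨q, (rfl | hq), hc⟩)
      · exact Or.inl (Or.inl h)
      · exact Or.inl (Or.inr hc)
      · exact Or.inr ⟨q, hq, hc⟩

lemma mem_pvExpandB (g : List (List String)) (dr dc : Int)
    (s : PySem.Set (Int × Int)) (z : Int × Int) :
    z ∈ pvExpandB g dr dc s ↔ ∃ p ∈ s, pvChild g dr dc p z := by
  unfold pvExpandB
  rw [mem_foldl_pvStepB]
  simp [PySem.Set.empty]

lemma pvChild_mem_univ (g : List (List String)) (dr dc : Int) (p0 p z : Int × Int)
    (hc : pvChild g dr dc p z) : z ∈ pvUniv g p0 := by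
  obtain ⟨hb, -, hz⟩ := hc
  obtain ⟨h1, h2, h3, h4⟩ := pvBad_false_bounds g dr dc p hb
  rw [pvUniv_mem]
  refine Or.inr ?_
  rcases hz with rfl | rfl
  · simp only [pvNxt]
    exact ⟨h1, by omega, by omega, by omega⟩
  · have hf := pvOff_fst g dr dc p
    rcases pvOff_snd g dr dc p with hs | hs <;>
      exact ⟨by omega, by omega, by omega, by omega⟩

lemma pvCloseB_spec (g : List (List String)) (dr dc : Int) (p0 : Int × Int) :
    ∀ (n : Nat) (s : PySem.Set (Int × Int)), s.Nodup →
      (∀ p ∈ s, p ∈ pvUniv g p0) → (∀ p ∈ s, PvReach g dr dc p0 p) →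
      (pvUniv g p0).length - s.length < n →
      (∀ p ∈ s, p ∈ pvCloseB g dr dc n s) ∧
      (∀ z ∈ pvCloseB g dr dc n s, PvReach g dr dc p0 z) ∧
      (∀ z ∈ pvExpandB g dr dc (pvCloseB g dr dc n s), z ∈ pvCloseB g dr dc n s) := by
  intro n
  induction n with
  | zero =>
    intro s hnd hsub hreach hlt
    have hlen : s.length ≤ (pvUniv g p0).length := pvSeenLen _ _ hnd hsub
    omega
  | succ n ih =>
    intro s hnd hsub hreach hlt
    show _ ∧ _
    unfold pvCloseB
    by_cases hss : PySem.Set.issubset (pvExpandB g dr dc s) s = true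
    · rw [if_pos hss]
      refine ⟨fun p hp => hp, hreach, ?_⟩
      exact fun z hz => (PySem.Set.issubset_iff _ _).mp hss z hz
    · rw [if_neg hss]
      -- the loop recurses with reached |= new, which is strictly larger
      set nw := pvExpandB g dr dc s with hnw
      set s' := PySem.Set.update s nw with hs'
      have hmem' : ∀ z, z ∈ s' ↔ z ∈ s ∨ z ∈ nw := fun z => PySem.Set.mem_update s nw z
      have hnd' : s'.Nodup := PySem.Set.nodup_update s nw hnd
      have hsub' : ∀ p ∈ s', p ∈ pvUniv g p0 := by
        intro p hp
        rcases (hmem' p).mp hp with h | h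
        · exact hsub p h
        · obtain ⟨q, -, hc⟩ := (mem_pvExpandB g dr dc s p).mp h
          exact pvChild_mem_univ g dr dc p0 q p hc
      have hreach' : ∀ p ∈ s', PvReach g dr dc p0 p := by
        intro p hp
        rcases (hmem' p).mp hp with h | h
        · exact hreach p h
        · obtain ⟨q, hq, hb, hd, hz⟩ := (mem_pvExpandB g dr dc s p).mp h
          exact PvReach.step _ _ (hreach q hq) hb hd (by tauto)
      have hgrow : s.length + 1 ≤ s'.length := by
        obtain ⟨q, hq, hqs⟩ : ∃ q ∈ nw, q ∉ s := by
          by_contra hcon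
          push Not at hcon
          exact hss ((PySem.Set.issubset_iff _ _).mpr hcon)
        have hfe : s' = s ++ (PySem.Set.ofList nw).filter (fun y => !(PySem.Set.contains s y)) :=
          PySem.Set.update_eq_append_filter s nw
        have hqf : q ∈ (PySem.Set.ofList nw).filter (fun y => !(PySem.Set.contains s y)) := by
          rw [List.mem_filter]
          refine ⟨(PySem.Set.mem_ofList nw q).mpr hq, ?_⟩
          simp only [Bool.not_eq_true']
          exact (Bool.not_eq_true _).mp (fun hx => hqs ((PySem.Set.contains_iff s q).mp hx))
        have : 0 < ((PySem.Set.ofList nw).filter (fun y => !(PySem.Set.contains s y))).length :=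
          List.length_pos_of_mem hqf
        rw [hfe, List.length_append]
        omega
      have hlen' : s'.length ≤ (pvUniv g p0).length := pvSeenLen _ _ hnd' hsub'
      obtain ⟨i1, i2, i3⟩ := ih s' hnd' hsub' hreach' (by omega)
      exact ⟨fun p hp => i1 p ((hmem' p).mpr (Or.inl hp)), i2, i3⟩

-- ===== assembly =====

lemma pvDeltaB_eq (instruction : String) : pvDeltaB instruction = pvDeltaA instruction := by
  unfold pvDeltaB pvDeltaA
  by_cases h1 : instruction = "^"
  · subst h1; rfl
  · by_cases h2 : instruction = "v"
    · subst h2; rfl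
    · by_cases h3 : instruction = "<"
      · subst h3; rfl
      · rw [if_neg h1, if_neg h2, if_neg h3]
        show ((((PySem.Dict.empty.insert "^" ((-1 : Int), (0 : Int))).insert "v"
            (1, 0)).insert "<" (0, -1)).get? instruction).getD (0, 1) = (0, 1)
        rw [PySem.Dict.get?_insert, if_neg h3, PySem.Dict.get?_insert, if_neg h2,
            PySem.Dict.get?_insert, if_neg h1, PySem.Dict.get?_empty]
        rfl

lemma pvSafe_eq (g : List (List String)) (dr dc : Int) (p : Int × Int) :
    (decide (0 ≤ p.1 + dr ∧ p.1 + dr < (g.length : Int) ∧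
             0 ≤ p.2 + dc ∧ p.2 + dc < ((g.headD []).length : Int)) &&
     (PySem.List.pyGetD (PySem.List.pyGetD g (p.1 + dr) []) (p.2 + dc) "" != "#")) =
    !pvBad g dr dc p := by
  apply Bool.eq_iff_iff.mpr
  rw [Bool.and_eq_true, decide_eq_true_eq, Bool.not_eq_true', pvBad_false_iff]
  constructor
  · rintro ⟨hg, hc⟩
    exact ⟨hg, by simpa [pvCellA] using hc⟩
  · rintro ⟨hg, hc⟩
    exact ⟨hg, by simpa [pvCellA] using hc⟩

lemma pvBad_true_of_oob (g : List (List String)) (dr dc : Int) (p : Int × Int)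
    (h : ¬ (0 ≤ p.1 + dr ∧ p.1 + dr < (g.length : Int) ∧
            0 ≤ p.2 + dc ∧ p.2 + dc < ((g.headD []).length : Int))) :
    pvBad g dr dc p = true := by
  simp only [pvBad, pvInBoundsA, Bool.or_eq_true, Bool.not_eq_eq_eq_not, Bool.not_true,
    Bool.and_eq_false_iff, decide_eq_false_iff_not]
  left
  omega

-- B's value is 'every reachable cell can be pushed into': both directions via pvCloseB_spec
lemma pvAltB_true_iff (g : List (List String)) (row col : Int) (instruction : String)
    (dr dc : Int) (hd : pvDeltaA instruction = (dr, dc)) :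
    is_path_clear_for_vertical_move_alt g row col instruction = true ↔
      ∀ q, PvReach g dr dc (row, col) q → pvBad g dr dc q = false := by
  unfold is_path_clear_for_vertical_move_alt
  rw [pvDeltaB_eq, hd]
  set F := g.length * ((g.headD []).length + 2) + 2 with hF
  set s0 : PySem.Set (Int × Int) := PySem.Set.ofList [(row, col)] with hs0
  have hs0e : s0 = [(row, col)] := rfl
  have hstart : ∀ p ∈ s0, p ∈ pvUniv g (row, col) := by
    intro p hp
    rw [hs0e, List.mem_singleton] at hp
    subst hp
    exact List.mem_cons_self
  have hlen : (pvUniv g (row, col)).length - s0.length < F := by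
    rw [pvUniv_length, hs0e]
    simp only [List.length_singleton]
    omega
  obtain ⟨h1, h2, h3⟩ := pvCloseB_spec g dr dc (row, col) F s0
    (by rw [hs0e]; exact List.nodup_singleton _)
    hstart
    (by intro p hp; rw [hs0e, List.mem_singleton] at hp; subst hp; exact PvReach.refl)
    hlen
  set R := pvCloseB g dr dc F s0 with hR
  rw [List.all_eq_true]
  constructor
  · intro hall q hq
    -- R is closed, so it contains every reachable cell, and each is checked safe by `all`
    have hclosed : ∀ z ∈ R, pvBad g dr dc z = false ∧
        (pvDone g dr dc z = false → pvOff g dr dc z ∈ R ∧ pvNxt dr dc z ∈ R) := by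
      intro z hz
      have hsafe : pvBad g dr dc z = false := by
        have := hall z hz
        rw [pvSafe_eq] at this
        exact Bool.not_eq_true' .. |>.mp this
      refine ⟨hsafe, fun hdz => ⟨?_, ?_⟩⟩
      · exact h3 _ ((mem_pvExpandB g dr dc R _).mpr ⟨z, hz, hsafe, hdz, Or.inr rfl⟩)
      · exact h3 _ ((mem_pvExpandB g dr dc R _).mpr ⟨z, hz, hsafe, hdz, Or.inl rfl⟩)
    have hstartR : (row, col) ∈ R := h1 _ (by rw [hs0e]; exact List.mem_singleton.mpr rfl)
    -- induct along reachability, staying inside R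
    have : q ∈ R ∧ pvBad g dr dc q = false := by
      induction hq with
      | refl => exact ⟨hstartR, (hclosed _ hstartR).1⟩
      | step a b ha hbad hdone hc ihq =>
        have haR := ihq.1
        have hk := (hclosed a haR).2 hdone
        rcases hc with rfl | rfl
        · exact ⟨hk.1, (hclosed _ hk.1).1⟩
        · exact ⟨hk.2, (hclosed _ hk.2).1⟩
    exact this.2
  · intro hsafe p hp
    rw [pvSafe_eq, Bool.not_eq_true']
    exact hsafe p (h2 p hp)

-- the two ports agree whenever A's fueled recursion comes back
lemma pvAB_eq (g : List (List String)) (row col : Int) (instruction : String)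
    (dr dc : Int) (hd : pvDeltaA instruction = (dr, dc)) (FA : Nat)
    (hA : pvGoA g dr dc FA row col ≠ none) :
    (pvGoA g dr dc FA row col).getD false =
      is_path_clear_for_vertical_move_alt g row col instruction := by
  obtain ⟨a, ha⟩ : ∃ a, pvGoA g dr dc FA row col = some a :=
    Option.ne_none_iff_exists'.mp hA
  rw [ha]
  by_cases hP : ∀ q, PvReach g dr dc (row, col) q → pvBad g dr dc q = false
  · have hAt : pvGoA g dr dc FA row col = some true := pvGoA_complete g dr dc FA row col hA hP
    rw [ha] at hAt
    rw [Option.some_inj.mp hAt]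
    exact ((pvAltB_true_iff g row col instruction dr dc hd).mpr hP).symm
  · have hBf : is_path_clear_for_vertical_move_alt g row col instruction = false := by
      rw [← Bool.not_eq_true]
      intro hx
      exact hP ((pvAltB_true_iff g row col instruction dr dc hd).mp hx)
    have ha' : a = false := by
      cases a with
      | false => rfl
      | true =>
        exact absurd (pvGoA_true_reach g dr dc FA row col (by rw [ha])) hP
    rw [ha', hBf]
    rfl

lemma pvA_oob (g : List (List String)) (dr dc : Int) (row col : Int) (FA : Nat)
    (hpos : 0 < FA)
    (h : ¬ (0 ≤ row + dr ∧ row + dr < (g.length : Int) ∧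
            0 ≤ col + dc ∧ col + dc < ((g.headD []).length : Int))) :
    pvGoA g dr dc FA row col ≠ none := by
  rw [pvGoA_bad_eval g dr dc FA row col (pvBad_true_of_oob g dr dc (row, col) h) hpos]
  simp

-- ===== VERDICT (by name: the statement is the Claim_ definition above) =====
theorem is_path_clear_for_vertical_move_spec : Claim_equal_is_path_clear_for_vertical_move := by
  intro grid row col instruction hdom hpre
  unfold Spec_is_path_clear_for_vertical_move
  simp only [is_path_clear_for_vertical_move]
  unfold Pre_is_path_clear_for_vertical_move at hpre
  by_cases h1 : instruction = "^"
  · subst h1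
    simp only [pvDeltaA, String.reduceEq, reduceIte] at hpre ⊢
    rcases hpre with hoob | ⟨hshape, -⟩
    · exact pvAB_eq grid row col "^" (-1) 0 rfl _
        (pvA_oob grid (-1) 0 row col _ (by omega) hoob)
    · exact pvAB_eq grid row col "^" (-1) 0 rfl _
        (pvGoA_up_total grid _ row col (by omega))
  · by_cases h2 : instruction = "v"
    · subst h2
      simp only [pvDeltaA, String.reduceEq, reduceIte] at hpre ⊢
      rcases hpre with hoob | ⟨hshape, -⟩
      · exact pvAB_eq grid row col "v" 1 0 rfl _
          (pvA_oob grid 1 0 row col _ (by omega) hoob)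
      · exact pvAB_eq grid row col "v" 1 0 rfl _
          (pvGoA_down_total grid _ row col (by omega))
    · by_cases h3 : instruction = "<"
      · subst h3
        simp only [pvDeltaA, String.reduceEq, reduceIte] at hpre ⊢
        rcases hpre with hoob | ⟨hshape, hinst⟩
        · exact pvAB_eq grid row col "<" 0 (-1) rfl _
            (pvA_oob grid 0 (-1) row col _ (by omega) hoob)
        · have hcond : ∀ s ∈ (grid.getD row.toNat []).take col.toNat, s = "#" ∨ s = "." ∨ s = "]" := by
            rcases hinst with h | h | ⟨-, h⟩ | ⟨-, -, hne, -⟩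
            · exact absurd h (by simp)
            · exact absurd h (by simp)
            · exact h
            · exact absurd rfl hne
          exact pvAB_eq grid row col "<" 0 (-1) rfl _
            (pvGoA_left_total grid hshape row _ col hcond (by omega))
      · have hdelt : pvDeltaA instruction = (0, 1) := by
          unfold pvDeltaA
          rw [if_neg h1, if_neg h2, if_neg h3]
        simp only [pvDeltaA, h1, h2, h3, if_false] at hpre ⊢
        rcases hpre with hoob | ⟨hshape, hinst⟩
        · exact pvAB_eq grid row col instruction 0 1 hdelt _
            (pvA_oob grid 0 1 row col _ (by omega) hoob)
        · have hcond : ∀ s ∈ (grid.getD row.toNat []).drop (col + 1).toNat, s ≠ "]" := by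
            rcases hinst with h | h | ⟨h, -⟩ | ⟨-, -, -, h⟩
            · exact h.elim
            · exact h.elim
            · exact h.elim
            · exact h
          exact pvAB_eq grid row col instruction 0 1 hdelt _
            (pvGoA_right_total grid hshape row _ col hcond (by omega))
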